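-- pv_equiv track=rewrite | github.com/NguyenNhutQuoc/Test | LearningPythonAndMachineLearning/matrix.py | aimlessAccumulation
-- ===== SOURCE A (Python) =====
-- def aimlessAccumulation(matrix, k):
--     matrixAimlessAccumulation = []
--     for i in range(len(matrix)):
--         add = []
--         for j in range(len(matrix[0])):
--             add.append(matrix[i][j])
--         matrixAimlessAccumulation.append(add)
--     for i in range(len(matrixAimlessAccumulation)):
--         for j in range(len(matrixAimlessAccumulation[0])):
--             matrixAimlessAccumulation[i][j] *= k
--     return matrixAimlessAccumulation
-- ===== SOURCE B (Python) =====
-- def aimlessAccumulation(matrix, k):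
--     # Column-major: grow all result rows in parallel, one column per step.
--     if not matrix:
--         return []
--     rows = [[] for _ in matrix]
--     for j in range(len(matrix[0])):
--         for r, row in zip(rows, matrix):
--             r.append(row[j] * k)
--     return rows
-- ===== Notes on version B (the rewrite author's own statement) =====
-- stated objective: alternative
-- what changed: Replaces A's row-major copy pass plus in-place multiply pass with a column-major traversal that grows all result rows in parallel, appending the scaled j-th column entry to every row per step.
import Mathlib
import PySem

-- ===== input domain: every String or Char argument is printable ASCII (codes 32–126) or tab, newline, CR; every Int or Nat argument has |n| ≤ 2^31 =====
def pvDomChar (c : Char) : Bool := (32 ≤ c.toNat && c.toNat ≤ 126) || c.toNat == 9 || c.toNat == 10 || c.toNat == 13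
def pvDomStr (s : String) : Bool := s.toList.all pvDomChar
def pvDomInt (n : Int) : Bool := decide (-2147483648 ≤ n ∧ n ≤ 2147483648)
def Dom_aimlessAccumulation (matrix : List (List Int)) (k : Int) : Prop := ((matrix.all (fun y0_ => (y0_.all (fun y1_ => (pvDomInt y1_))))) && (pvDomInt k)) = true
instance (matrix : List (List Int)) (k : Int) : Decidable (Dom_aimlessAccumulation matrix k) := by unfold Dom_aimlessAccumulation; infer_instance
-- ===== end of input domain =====

-- B replaces A's row-major copy pass + in-place multiply pass with a
-- column-major traversal growing all result rows in parallel (objective: alternative).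

-- ===== PORT A =====
-- Literal port of A: first loop copies matrix element by element (column bound
-- len(matrix[0])), second loop multiplies each copied entry in place by k.
-- matrix[i][j] is ported as pyGetD (exact whenever Python does not raise
-- IndexError; the raising inputs are exactly those excluded by Pre_),
-- the in-place assignment m[i][j] *= k as pySetD.
def aimlessAccumulation (matrix : List (List Int)) (k : Int) : List (List Int) :=
  let copy : List (List Int) :=
    (PySem.List.pyRange 0 (matrix.length : Int) 1).foldl (fun acc i =>
      acc ++ [(PySem.List.pyRange 0 ((PySem.List.pyGetD matrix 0 []).length : Int) 1).foldl
          (fun add j => add ++ [PySem.List.pyGetD (PySem.List.pyGetD matrix i []) j 0]) []]) []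
  (PySem.List.pyRange 0 (copy.length : Int) 1).foldl (fun m i =>
    (PySem.List.pyRange 0 ((PySem.List.pyGetD m 0 []).length : Int) 1).foldl
      (fun m j =>
        PySem.List.pySetD m i
          (PySem.List.pySetD (PySem.List.pyGetD m i []) j
            ((PySem.List.pyGetD (PySem.List.pyGetD m i []) j 0) * k))) m) copy

-- ===== PORT B =====
-- Port of B: if not matrix: return []; rows = [[] for _ in matrix];
-- for j in range(len(matrix[0])): for r, row in zip(rows, matrix): r.append(row[j]*k);
-- return rows.  Column-major: each range step appends the scaled j-th column
-- entry to every row of the accumulator.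
def aimlessAccumulation_alt (matrix : List (List Int)) (k : Int) : List (List Int) :=
  if matrix.isEmpty then []
  else
    (PySem.List.pyRange 0 ((PySem.List.pyGetD matrix 0 []).length : Int) 1).foldl
      (fun rows j =>
        (rows.zip matrix).map (fun p => p.1 ++ [PySem.List.pyGetD p.2 j 0 * k]))
      (matrix.map (fun _ => []))

-- ===== PRECONDITION & SPEC =====
-- Pre_ excludes exactly the jagged matrices in which some row is shorter than
-- row 0: there both Pythons raise IndexError (on matrix[i][j] resp. row[j]).
def Pre_aimlessAccumulation (matrix : List (List Int)) (k : Int) : Prop :=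
  matrix.all (fun row => (matrix.headD []).length ≤ row.length) = true
instance (matrix : List (List Int)) (k : Int) : Decidable (Pre_aimlessAccumulation matrix k) := by unfold Pre_aimlessAccumulation; infer_instance

def pvWitness_aimlessAccumulation : List (List Int) × Int := ([[1, 2], [3, 4]], 3)

def Spec_aimlessAccumulation (matrix : List (List Int)) (k : Int) (out : List (List Int)) : Prop := out = aimlessAccumulation_alt matrix k
instance (matrix : List (List Int)) (k : Int) (out : List (List Int)) : Decidable (Spec_aimlessAccumulation matrix k out) := by unfold Spec_aimlessAccumulation; infer_instance

-- ===== CLAIM (what is proved, stated in full; the proofs are below) =====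
def Claim_equal_aimlessAccumulation : Prop := ∀ (matrix : List (List Int)) (k : Int), Dom_aimlessAccumulation matrix k → Pre_aimlessAccumulation matrix k → Spec_aimlessAccumulation matrix k (aimlessAccumulation matrix k)

-- ===== LEMMAS AND PROOFS =====

-- row i after the inner multiply loop has processed columns 0..t-1
def pvMulUpTo (k : Int) (t : Nat) (row : List Int) : List Int :=
  (row.take t).map (· * k) ++ row.drop t

theorem pvGetD_append_length {α : Type} (pre : List α) (r : α) (rest : List α) (d : α) :
    (pre ++ r :: rest).getD pre.length d = r := by
  induction pre with
  | nil => rfl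
  | cons a pre ih => simp

theorem pvSet_append_length {α : Type} (pre : List α) (r : α) (rest : List α) (v : α) :
    (pre ++ r :: rest).set pre.length v = pre ++ v :: rest := by
  induction pre with
  | nil => rfl
  | cons a pre ih => simp

theorem pvPyGetD_append_length (pre : List (List Int)) (r : List Int) (rest : List (List Int)) :
    PySem.List.pyGetD (pre ++ r :: rest) (pre.length : Int) [] = r := by
  simp [PySem.List.pyGetD_natCast]

theorem pvMulUpTo_zero (k : Int) (row : List Int) : pvMulUpTo k 0 row = row := by
  simp [pvMulUpTo]

theorem pvMulUpTo_full (k : Int) (row : List Int) :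
    pvMulUpTo k row.length row = row.map (· * k) := by
  simp [pvMulUpTo]

theorem pvMulUpTo_getD (k : Int) (t : Nat) (row : List Int) (ht : t < row.length) :
    PySem.List.pyGetD (pvMulUpTo k t row) (t : Int) 0 = row[t] := by
  have hlen : ((row.take t).map (· * k)).length = t := by
    simp [List.length_take, Nat.min_eq_left (Nat.le_of_lt ht)]
  have hdrop : row.drop t = row[t] :: row.drop (t + 1) :=
    List.drop_eq_getElem_cons ht
  have hget := pvGetD_append_length ((row.take t).map (· * k)) row[t] (row.drop (t + 1)) 0
  rw [hlen] at hget
  rw [PySem.List.pyGetD_natCast, pvMulUpTo, hdrop, hget]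

theorem pvMulUpTo_set (k : Int) (t : Nat) (row : List Int) (ht : t < row.length) :
    PySem.List.pySetD (pvMulUpTo k t row) (t : Int) (row[t] * k) = pvMulUpTo k (t + 1) row := by
  have hlen : ((row.take t).map (· * k)).length = t := by
    simp [List.length_take, Nat.min_eq_left (Nat.le_of_lt ht)]
  have hdrop : row.drop t = row[t] :: row.drop (t + 1) :=
    List.drop_eq_getElem_cons ht
  have htake : row.take (t + 1) = row.take t ++ [row[t]] := by
    rw [List.take_add_one, List.getElem?_eq_getElem ht]
    rfl
  have hset := pvSet_append_length ((row.take t).map (· * k)) row[t] (row.drop (t + 1))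
    (row[t] * k)
  rw [hlen] at hset
  have hmap : (row.take (t + 1)).map (· * k) = (row.take t).map (· * k) ++ [row[t] * k] := by
    rw [htake, List.map_append]; rfl
  rw [PySem.List.pySetD_natCast, pvMulUpTo, pvMulUpTo, hdrop, hset, hmap]
  simp

-- the inner multiply loop only rewrites row pre.length, column by column
theorem pvInner (k : Int) (pre : List (List Int)) (row : List Int) (rest : List (List Int))
    (t : Nat) (ht : t ≤ row.length) :
    (PySem.List.pyRange 0 (t : Int) 1).foldl
      (fun m j =>
        PySem.List.pySetD m (pre.length : Int)
          (PySem.List.pySetD (PySem.List.pyGetD m (pre.length : Int) []) j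
            ((PySem.List.pyGetD (PySem.List.pyGetD m (pre.length : Int) []) j 0) * k)))
      (pre ++ row :: rest) = pre ++ pvMulUpTo k t row :: rest := by
  induction t with
  | zero =>
    rw [PySem.List.pyRange_one_eq_nil (by omega)]
    simp [pvMulUpTo_zero]
  | succ t ih =>
    have h1 : ((t + 1 : Nat) : Int) = (t : Int) + 1 := by push_cast; ring
    rw [h1, PySem.List.pyRange_one_succ_right (by positivity), List.foldl_append,
      ih (by omega)]
    simp only [List.foldl_cons, List.foldl_nil, pvPyGetD_append_length]
    rw [pvMulUpTo_getD k t row (by omega), pvMulUpTo_set k t row (by omega),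
      PySem.List.pySetD_natCast, pvSet_append_length]

theorem pvHeadLen (n : Nat) (pre : List (List Int)) (p : List Int) (rest : List (List Int))
    (hpre : ∀ r ∈ pre, r.length = n) (hp : p.length = n) :
    (PySem.List.pyGetD (pre ++ p :: rest) 0 []).length = n := by
  cases pre with
  | nil => simpa [PySem.List.pyGetD_zero] using hp
  | cons a pre => simpa [PySem.List.pyGetD_zero] using hpre a (by simp)

-- the outer multiply loop, processing rows pre.length .. pre.length+post.length-1
theorem pvOuter (k : Int) (n : Nat) (post pre : List (List Int))
    (hpre : ∀ r ∈ pre, r.length = n) (hpost : ∀ r ∈ post, r.length = n) :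
    (PySem.List.pyRange (pre.length : Int) ((pre.length : Int) + (post.length : Int)) 1).foldl
      (fun m i =>
        (PySem.List.pyRange 0 ((PySem.List.pyGetD m 0 []).length : Int) 1).foldl
          (fun m j =>
            PySem.List.pySetD m i
              (PySem.List.pySetD (PySem.List.pyGetD m i []) j
                ((PySem.List.pyGetD (PySem.List.pyGetD m i []) j 0) * k))) m)
      (pre ++ post) = pre ++ post.map (fun r => r.map (· * k)) := by
  induction post generalizing pre with
  | nil =>
    rw [PySem.List.pyRange_one_eq_nil (by simp)]
    simp
  | cons p rest ih =>
    rw [PySem.List.pyRange_one_cons (by push_cast [List.length_cons]; omega)]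
    simp only [List.foldl_cons]
    rw [pvHeadLen n pre p rest hpre (hpost p (by simp)),
      show (n : Int) = (p.length : Int) by rw [hpost p (by simp)],
      pvInner k pre p rest p.length le_rfl, pvMulUpTo_full]
    have hstep : pre ++ (p.map (· * k)) :: rest = (pre ++ [p.map (· * k)]) ++ rest := by
      simp
    have hlen1 : ((pre ++ [p.map (· * k)]).length : Int) = (pre.length : Int) + 1 := by
      simp
    have hlen2 : (pre.length : Int) + ((p :: rest).length : Int)
        = ((pre ++ [p.map (· * k)]).length : Int) + (rest.length : Int) := by
      simp; omega
    rw [hstep, hlen2, ← hlen1]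
    rw [ih (pre ++ [p.map (· * k)])
      (by intro r hr
          rcases List.mem_append.1 hr with h | h
          · exact hpre r h
          · simp at h; subst h; simpa using hpost p (by simp))
      (by intro r hr; exact hpost r (by simp [hr]))]
    simp

-- the copy loop is a map
theorem pvPhase1 (matrix : List (List Int)) :
    (PySem.List.pyRange 0 (matrix.length : Int) 1).foldl (fun acc i =>
      acc ++ [(PySem.List.pyRange 0 ((PySem.List.pyGetD matrix 0 []).length : Int) 1).foldl
          (fun add j => add ++ [PySem.List.pyGetD (PySem.List.pyGetD matrix i []) j 0]) []]) []
    = matrix.map (fun row =>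
        (PySem.List.pyRange 0 ((PySem.List.pyGetD matrix 0 []).length : Int) 1).map
          (fun j => PySem.List.pyGetD row j 0)) := by
  simp only [PySem.List.foldl_append_singleton_eq_map, List.nil_append]
  rw [show (fun i => ((PySem.List.pyRange 0 ((PySem.List.pyGetD matrix 0 []).length : Int) 1).map
        (fun j => PySem.List.pyGetD (PySem.List.pyGetD matrix i []) j 0)))
      = (fun row => (PySem.List.pyRange 0 ((PySem.List.pyGetD matrix 0 []).length : Int) 1).map
        (fun j => PySem.List.pyGetD row j 0)) ∘ (fun i => PySem.List.pyGetD matrix i []) from rfl,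
    ← List.map_map, PySem.List.map_pyGetD_pyRange_zero']

theorem pvOuterZero (k : Int) (n : Nat) (post : List (List Int))
    (hpost : ∀ r ∈ post, r.length = n) :
    (PySem.List.pyRange 0 (post.length : Int) 1).foldl
      (fun m i =>
        (PySem.List.pyRange 0 ((PySem.List.pyGetD m 0 []).length : Int) 1).foldl
          (fun m j =>
            PySem.List.pySetD m i
              (PySem.List.pySetD (PySem.List.pyGetD m i []) j
                ((PySem.List.pyGetD (PySem.List.pyGetD m i []) j 0) * k))) m)
      post = post.map (fun r => r.map (· * k)) := by
  have h := pvOuter k n post [] (by simp) hpost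
  simpa using h

-- A computes the row-major closed form
theorem pvA_closed (matrix : List (List Int)) (k : Int) :
    aimlessAccumulation matrix k
    = matrix.map (fun row =>
        (PySem.List.pyRange 0 ((PySem.List.pyGetD matrix 0 []).length : Int) 1).map
          (fun j => PySem.List.pyGetD row j 0 * k)) := by
  unfold aimlessAccumulation
  simp only []
  rw [pvPhase1]
  have hglen : ∀ r ∈ matrix.map (fun row =>
      (PySem.List.pyRange 0 ((PySem.List.pyGetD matrix 0 []).length : Int) 1).map
        (fun j => PySem.List.pyGetD row j 0)),
      r.length = (PySem.List.pyGetD matrix 0 []).length := by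
    intro r hr
    simp only [List.mem_map] at hr
    obtain ⟨row, _, rfl⟩ := hr
    simp [PySem.List.length_pyRange_one]
  rw [pvOuterZero k (PySem.List.pyGetD matrix 0 []).length _ hglen]
  simp [List.map_map, Function.comp]

theorem pvZipMapSelf {α β : Type} (f : α → β) (l : List α) :
    ((l.map f).zip l) = l.map (fun x => (f x, x)) := by
  induction l with
  | nil => rfl
  | cons a l ih => simp [ih]

-- invariant of B's column loop: after columns 0..t-1, each row holds its first t scaled entries
theorem pvColLoop (matrix : List (List Int)) (k : Int) (t : Nat) :
    (PySem.List.pyRange 0 (t : Int) 1).foldl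
      (fun rows j =>
        (rows.zip matrix).map (fun p => p.1 ++ [PySem.List.pyGetD p.2 j 0 * k]))
      (matrix.map (fun _ => []))
    = matrix.map (fun row =>
        (PySem.List.pyRange 0 (t : Int) 1).map (fun j => PySem.List.pyGetD row j 0 * k)) := by
  induction t with
  | zero =>
    rw [PySem.List.pyRange_one_eq_nil (by omega)]
    simp
  | succ t ih =>
    have h1 : ((t + 1 : Nat) : Int) = (t : Int) + 1 := by push_cast; ring
    rw [h1, PySem.List.pyRange_one_succ_right (by positivity), List.foldl_append, ih]
    simp only [List.foldl_cons, List.foldl_nil, pvZipMapSelf, List.map_map]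
    simp [Function.comp]

-- ===== VERDICT (by name: the statement is the Claim_ definition above) =====
theorem aimlessAccumulation_spec : Claim_equal_aimlessAccumulation := by
  unfold Claim_equal_aimlessAccumulation
  intro matrix k _ _
  unfold Spec_aimlessAccumulation aimlessAccumulation_alt
  rw [pvA_closed]
  cases matrix with
  | nil => simp
  | cons r rest =>
    rw [if_neg (by simp)]
    rw [pvColLoop (r :: rest) k (PySem.List.pyGetD (r :: rest) 0 []).length]
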